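-- pv_equiv track=rewrite | github.com/JKHira/sdsl2_coder | references/sdsl2_core/format.py | _order_pairs
-- ===== SOURCE A (Python) =====
-- from typing import Iterable, Optional
--
-- CANONICAL_META_KEY_ORDER = [
--     "profile",
--     "id_prefix",
--     "id",
--     "bind",
--     "title",
--     "desc",
--     "refs",
--     "contract",
--     "ssot",
--     "severity",
-- ]
--
-- def _order_pairs(pairs: Iterable[tuple[str, str]]) -> list[tuple[str, str]]:
--     rank = {key: index for index, key in enumerate(CANONICAL_META_KEY_ORDER)}
--     result = []
--     for index, (key, value) in enumerate(pairs):
--         key_rank = rank.get(key, len(CANONICAL_META_KEY_ORDER))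
--         sort_key = (key_rank, key if key_rank == len(CANONICAL_META_KEY_ORDER) else "", index)
--         result.append((sort_key, (key, value)))
--     result.sort(key=lambda item: item[0])
--     return [value for _, value in result]
-- ===== SOURCE B (Python) =====
-- CANONICAL_META_KEY_ORDER = [
--     "profile",
--     "id_prefix",
--     "id",
--     "bind",
--     "title",
--     "desc",
--     "refs",
--     "contract",
--     "ssot",
--     "severity",
-- ]
--
-- def _order_pairs(pairs):
--     items = list(pairs)
--     known = set(CANONICAL_META_KEY_ORDER)
--     out = []
--     for k in CANONICAL_META_KEY_ORDER:
--         out.extend(p for p in items if p[0] == k)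
--     out.extend(sorted((p for p in items if p[0] not in known), key=lambda p: p[0]))
--     return out
-- ===== Notes on version B (the rewrite author's own statement) =====
-- stated objective: simpler
-- what changed: Replaces the decorate-with-(rank,key,index)-tuples / sort / project pipeline by a partition-and-emit: concatenate the pairs for each canonical key in canonical order by direct filtering, then append the unknown-key pairs stably sorted by key string alone.
import Mathlib
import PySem

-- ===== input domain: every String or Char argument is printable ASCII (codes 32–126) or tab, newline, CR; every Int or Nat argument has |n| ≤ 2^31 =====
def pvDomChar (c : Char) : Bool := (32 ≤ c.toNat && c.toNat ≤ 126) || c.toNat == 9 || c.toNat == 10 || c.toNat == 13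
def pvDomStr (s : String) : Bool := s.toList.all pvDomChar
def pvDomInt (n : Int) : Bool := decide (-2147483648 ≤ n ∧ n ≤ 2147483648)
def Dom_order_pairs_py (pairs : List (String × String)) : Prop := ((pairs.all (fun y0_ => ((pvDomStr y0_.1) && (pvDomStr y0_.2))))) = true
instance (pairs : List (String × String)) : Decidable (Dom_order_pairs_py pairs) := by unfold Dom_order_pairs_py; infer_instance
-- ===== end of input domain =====

-- B replaces A's decorate-with-(rank,key,index)/sort/project pipeline by partition-and-emit:
-- filter out each canonical key's pairs in canonical order, then append the unknown-key
-- pairs stably sorted by key string alone (objective: simpler).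

-- ===== PORT A =====
-- module constant CANONICAL_META_KEY_ORDER (shared context of both implementations)
def pvCanon : List String :=
  ["profile", "id_prefix", "id", "bind", "title", "desc", "refs", "contract", "ssot", "severity"]

-- Python's 3-tuple sort key (rank, str, index) is rendered as the pair ((rank, str), index)
-- with (rank, str) a lexicographic Prod.Lex pair, and the sort by the 3-tuple key is
-- PySem.List.sorted2 on the two components (Python's tuple comparison, exactly).
def order_pairs_py (pairs : List (String × String)) : List (String × String) :=
  -- rank = {key: index for index, key in enumerate(CANONICAL_META_KEY_ORDER)}
  let rank : PySem.Dict String Int :=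
    (PySem.List.enumerate pvCanon 0).foldl (fun d ik => d.insert ik.2 ik.1) PySem.Dict.empty
  -- for index, (key, value) in enumerate(pairs): result.append((sort_key, (key, value)))
  let result : List (((Int ×ₗ String) × Int) × (String × String)) :=
    (PySem.List.enumerate pairs 0).foldl
      (fun res ikv =>
        let lenC : Int := (pvCanon.length : Int)   -- len(CANONICAL_META_KEY_ORDER)
        let key_rank : Int := rank.getD ikv.2.1 lenC
        let sort_key := (toLex (key_rank,
          if key_rank == lenC then ikv.2.1 else ""), ikv.1)
        res ++ [(sort_key, ikv.2)]) []
  -- result.sort(key=lambda item: item[0]); return [value for _, value in result]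
  (PySem.List.sorted2 result (fun item => item.1.1) (fun item => item.1.2) false).map
    (fun x => x.2)

-- ===== PORT B =====
def order_pairs_py_alt (pairs : List (String × String)) : List (String × String) :=
  let items := pairs
  let known : PySem.Set String := PySem.Set.ofList pvCanon
  let out := pvCanon.foldl (fun acc k => acc ++ items.filter (fun p => p.1 == k)) []
  out ++ PySem.List.sorted (items.filter (fun p => !(PySem.Set.contains known p.1)))
          (fun p => p.1) false

-- ===== PRECONDITION & SPEC =====
def Spec_order_pairs_py (pairs : List (String × String)) (out : List (String × String)) : Prop := out = order_pairs_py_alt pairs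
instance (pairs : List (String × String)) (out : List (String × String)) : Decidable (Spec_order_pairs_py pairs out) := by unfold Spec_order_pairs_py; infer_instance

-- ===== CLAIM (what is proved, stated in full; the proofs are below) =====
def Claim_equal_order_pairs_py : Prop := ∀ (pairs : List (String × String)), Dom_order_pairs_py pairs → Spec_order_pairs_py pairs (order_pairs_py pairs)

-- ===== LEMMAS AND PROOFS =====

-- the rank function A reads off its dict: rank.get(key, len(CANONICAL_META_KEY_ORDER))
def pvRF (k : String) : Int :=
  (((PySem.List.enumerate pvCanon 0).foldl (fun d ik => d.insert ik.2 ik.1)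
      PySem.Dict.empty : PySem.Dict String Int)).getD k (pvCanon.length : Int)

-- A's decoration of one enumerated pair
def pvDec (q : Int × (String × String)) : (((Int ×ₗ String) × Int) × (String × String)) :=
  ((toLex (pvRF q.2.1, if pvRF q.2.1 == (pvCanon.length : Int) then q.2.1 else ""), q.1), q.2)

lemma pvRF_not_mem {k : String} (h : k ∉ pvCanon) : pvRF k = 10 := by
  simp [pvCanon] at h
  obtain ⟨h1, h2, h3, h4, h5, h6, h7, h8, h9, h10⟩ := h
  simp [pvRF, pvCanon, PySem.List.enumerate, PySem.Dict.getD,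
    PySem.Dict.insert, PySem.Dict.empty, PySem.Dict.get?, beq_iff_eq,
    Ne.symm h1, Ne.symm h2, Ne.symm h3, Ne.symm h4, Ne.symm h5,
    Ne.symm h6, Ne.symm h7, Ne.symm h8, Ne.symm h9, Ne.symm h10]

lemma pvRF_lt_ten : ∀ k ∈ pvCanon, pvRF k < 10 := by decide

lemma pvRF_pairwise : pvCanon.Pairwise (fun a b => pvRF a < pvRF b) := by decide

-- unfolding of the lexicographic triple comparison
lemma pvLt_key (r1 r2 i1 i2 : Int) (s1 s2 : String) :
    (toLex (toLex (r1, s1), i1) < toLex (toLex (r2, s2), i2)) ↔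
      (r1 < r2 ∨ (r1 = r2 ∧ (s1 < s2 ∨ (s1 = s2 ∧ i1 < i2)))) := by
  rw [Prod.Lex.toLex_lt_toLex, Prod.Lex.toLex_lt_toLex, toLex_inj, Prod.mk.injEq]
  tauto

-- a two-key sorted2 is the sort by the lexicographic pair of the keys
lemma pvSorted2_eq {α κ₁ κ₂ : Type} [LinearOrder κ₁] [LinearOrder κ₂]
    (xs : List α) (k1 : α → κ₁) (k2 : α → κ₂) :
    PySem.List.sorted2 xs k1 k2 false
      = PySem.List.sorted xs (fun x => toLex (k1 x, k2 x)) false := by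
  have hb : (fun a b => decide (k1 a < k1 b) || (!decide (k1 b < k1 a) && decide (k2 a < k2 b)))
      = (fun a b => decide (toLex (k1 a, k2 a) < toLex (k1 b, k2 b))) := by
    funext a b
    by_cases h1 : k1 a < k1 b
    · simp [h1, Prod.Lex.toLex_lt_toLex]
    · by_cases h2 : k1 b < k1 a
      · have hne : ¬ k1 a = k1 b := fun h => absurd (h ▸ h2) (lt_irrefl _)
        simp [h1, h2, hne, Prod.Lex.toLex_lt_toLex]
      · have heq : k1 a = k1 b := le_antisymm (not_lt.1 h2) (not_lt.1 h1)
        simp [heq, Prod.Lex.toLex_lt_toLex]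
  show List.foldl (fun acc x => PySem.List.insertBy
      (fun a b => decide (k1 a < k1 b) || (!decide (k1 b < k1 a) && decide (k2 a < k2 b))) x acc) [] xs = _
  rw [hb]
  rfl

-- A computes: decorate every enumerated pair, sort by the key, project
lemma A_char (pairs : List (String × String)) :
    order_pairs_py pairs =
      (PySem.List.sorted ((PySem.List.enumerate pairs 0).map pvDec)
        (fun x => toLex x.1) false).map (fun x => x.2) := by
  show (PySem.List.sorted2 ((PySem.List.enumerate pairs 0).foldl (fun res ikv =>
      res ++ [pvDec ikv]) []) (fun item => item.1.1) (fun item => item.1.2) false).map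
      (fun x => x.2) = _
  rw [PySem.List.foldl_append_singleton_eq_map, pvSorted2_eq]
  rfl

-- B computes: canonical blocks by filtering, then the sorted unknown-key pairs
lemma B_char (pairs : List (String × String)) :
    order_pairs_py_alt pairs =
      pvCanon.flatMap (fun k => pairs.filter (fun p => p.1 == k)) ++
        PySem.List.sorted (pairs.filter (fun p => decide (p.1 ∉ pvCanon)))
          (fun p => p.1) false := by
  show pvCanon.foldl (fun acc k => acc ++ pairs.filter (fun p => p.1 == k)) [] ++ _ = _
  rw [PySem.List.foldl_append_eq_flatMap]
  simp only [List.nil_append]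
  congr 1
  have hf : List.filter (fun p => !(PySem.Set.ofList pvCanon).contains p.1) pairs
      = List.filter (fun p : String × String => decide (p.1 ∉ pvCanon)) pairs := by
    apply List.filter_congr
    intro p _
    simp [PySem.Set.contains, PySem.Set.mem_ofList]
  rw [hf]

-- partitioning a list by a nodup key list is a permutation of it
lemma pvPerm_blocks {α : Type} (keyOf : α → String) :
    ∀ (ks : List String), ks.Nodup → ∀ (D : List α),
      (ks.flatMap (fun k => D.filter (fun x => keyOf x == k)) ++
        D.filter (fun x => decide (keyOf x ∉ ks))).Perm D := by
  intro ks
  induction ks with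
  | nil => intro _ D; simp
  | cons k ks ih =>
    intro hnd D
    rw [List.nodup_cons] at hnd
    obtain ⟨hk, hnd⟩ := hnd
    rw [List.flatMap_cons, List.append_assoc]
    have hblocks : ks.flatMap (fun k' => D.filter (fun x => keyOf x == k'))
        = ks.flatMap (fun k' => (D.filter (fun x => !(keyOf x == k))).filter (fun x => keyOf x == k')) := by
      rw [List.flatMap_def, List.flatMap_def]
      congr 1
      apply List.map_congr_left
      intro k' hk'
      rw [List.filter_filter]
      apply List.filter_congr
      intro x _
      by_cases h : keyOf x = k'
      · have hne : k' ≠ k := fun hh => hk (hh ▸ hk')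
        simp [h, hne]
      · simp [h]
    have hleft : D.filter (fun x => decide (keyOf x ∉ k :: ks))
        = (D.filter (fun x => !(keyOf x == k))).filter (fun x => decide (keyOf x ∉ ks)) := by
      rw [List.filter_filter]
      apply List.filter_congr
      intro x _
      by_cases h1 : keyOf x = k <;> by_cases h2 : keyOf x ∈ ks <;> simp [h1, h2]
    rw [hblocks, hleft]
    exact List.Perm.trans (List.Perm.append_left _ (ih hnd _)) (List.filter_append_perm _ D)

-- pairwise over a flatMap of blocks followed by a tail
lemma pvPw_flatMap_append {α : Type} (R : α → α → Prop) :
    ∀ (ks : List String) (F : String → List α) (S : List α),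
      (∀ k ∈ ks, (F k).Pairwise R) →
      ks.Pairwise (fun a b => ∀ x ∈ F a, ∀ y ∈ F b, R x y) →
      (∀ k ∈ ks, ∀ x ∈ F k, ∀ y ∈ S, R x y) →
      S.Pairwise R →
      ((ks.flatMap F ++ S).Pairwise R) := by
  intro ks
  induction ks with
  | nil => intro F S _ _ _ hS; simpa
  | cons k ks ih =>
    intro F S h1 h2 h3 hS
    rw [List.flatMap_cons, List.append_assoc, List.pairwise_append]
    refine ⟨h1 k (by simp), ih F S (fun k' hk' => h1 k' (by simp [hk']))
      (List.Pairwise.sublist (by simp) h2)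
      (fun k' hk' => h3 k' (by simp [hk'])) hS, ?_⟩
    intro a ha b hb
    rcases List.mem_append.1 hb with hb | hb
    · rcases List.mem_flatMap.1 hb with ⟨k', hk', hbk'⟩
      exact (List.rel_of_pairwise_cons h2 hk') a ha b hbk'
    · exact h3 k (by simp) a ha b hb

lemma pvDec_key_unknown (q : Int × (String × String)) (h : q.2.1 ∉ pvCanon) :
    toLex (pvDec q).1 = toLex (toLex ((10 : Int), q.2.1), q.1) := by
  simp [pvDec, pvRF_not_mem h, pvCanon]

-- decorated insertion of a fresh (maximal-index) unknown pair mirrors key-of-snd insertion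
lemma pvIns_sim : ∀ (accl : List (Int × (String × String))) (q : Int × (String × String)),
    (∀ r ∈ accl, r.1 < q.1) → (∀ r ∈ accl, r.2.1 ∉ pvCanon) → q.2.1 ∉ pvCanon →
    PySem.List.insertBy (fun x y => decide (toLex x.1 < toLex y.1)) (pvDec q) (accl.map pvDec)
      = (PySem.List.insertBy (fun p r => decide (p.2.1 < r.2.1)) q accl).map pvDec := by
  intro accl
  induction accl with
  | nil => intro q _ _ _; simp [PySem.List.insertBy]
  | cons r t ih =>
    intro q hlt hmem hq
    have hr : r.2.1 ∉ pvCanon := hmem r (by simp)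
    have hcond : (toLex (pvDec q).1 < toLex (pvDec r).1) ↔ (q.2.1 < r.2.1) := by
      rw [pvDec_key_unknown q hq, pvDec_key_unknown r hr, pvLt_key]
      have : ¬ (q.1 < r.1) := by have := hlt r (by simp); omega
      simp [this]
    rw [List.map_cons]
    simp only [PySem.List.insertBy]
    by_cases hb : q.2.1 < r.2.1
    · have hd : toLex (pvDec q).1 < toLex (pvDec r).1 := hcond.2 hb
      simp [hb, hd]
    · have hd : ¬ toLex (pvDec q).1 < toLex (pvDec r).1 := fun h => hb (hcond.1 h)
      simp only [hb, hd, decide_false, Bool.false_eq_true, if_false, List.map_cons]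
      rw [ih q (fun x hx => hlt x (by simp [hx])) (fun x hx => hmem x (by simp [hx])) hq]

lemma pvFold_sim : ∀ (e accl : List (Int × (String × String))),
    e.Pairwise (fun p q => p.1 < q.1) →
    (∀ r ∈ accl, ∀ q ∈ e, r.1 < q.1) →
    (∀ r ∈ accl, r.2.1 ∉ pvCanon) → (∀ q ∈ e, q.2.1 ∉ pvCanon) →
    e.foldl (fun acc q => PySem.List.insertBy (fun x y => decide (toLex x.1 < toLex y.1)) (pvDec q) acc)
        (accl.map pvDec)
      = (e.foldl (fun acc q => PySem.List.insertBy (fun p r => decide (p.2.1 < r.2.1)) q acc) accl).map pvDec := by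
  intro e
  induction e with
  | nil => intro accl _ _ _ _; simp
  | cons q e ih =>
    intro accl hpw hacc hmem hqs
    rw [List.foldl_cons, List.foldl_cons,
      pvIns_sim accl q (fun r hr => hacc r hr q (by simp)) hmem (hqs q (by simp))]
    apply ih _ (List.Pairwise.sublist (by simp) hpw)
    · intro r hr q' hq'
      rcases (PySem.List.mem_insertBy _ _ _ _).1 hr with hr | hr
      · subst hr; exact (List.rel_of_pairwise_cons hpw) hq'
      · exact hacc r hr q' (by simp [hq'])
    · intro r hr
      rcases (PySem.List.mem_insertBy _ _ _ _).1 hr with hr | hr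
      · subst hr; exact hqs r (by simp)
      · exact hmem r hr
    · intro q' hq'; exact hqs q' (by simp [hq'])

lemma pvIns_snd : ∀ (accl : List (Int × (String × String))) (q : Int × (String × String)),
    (PySem.List.insertBy (fun p r => decide (p.2.1 < r.2.1)) q accl).map (fun x => x.2)
      = PySem.List.insertBy (fun a b => decide (a.1 < b.1)) q.2 (accl.map (fun x => x.2)) := by
  intro accl
  induction accl with
  | nil => intro q; simp [PySem.List.insertBy]
  | cons r t ih =>
    intro q
    simp only [List.map_cons, PySem.List.insertBy]
    by_cases hb : q.2.1 < r.2.1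
    · simp [hb]
    · simp only [hb, decide_false, Bool.false_eq_true, if_false, List.map_cons, ih]

lemma pvFold_snd : ∀ (e accl : List (Int × (String × String))),
    (e.foldl (fun acc q => PySem.List.insertBy (fun p r => decide (p.2.1 < r.2.1)) q acc) accl).map (fun x => x.2)
      = (e.map (fun q => q.2)).foldl
          (fun acc p => PySem.List.insertBy (fun a b => decide (a.1 < b.1)) p acc)
          (accl.map (fun x => x.2)) := by
  intro e
  induction e with
  | nil => intro accl; simp
  | cons q e ih =>
    intro accl
    rw [List.foldl_cons, ih, pvIns_snd, List.map_cons, List.foldl_cons]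

-- stability: sorting index-decorated unknown pairs by ((10,key),index) and projecting
-- is sorting the plain pairs by key
lemma pvStab (e : List (Int × (String × String)))
    (he : e.Pairwise (fun p q => p.1 < q.1))
    (h10 : ∀ q ∈ e, q.2.1 ∉ pvCanon) :
    (PySem.List.sorted (e.map pvDec) (fun x => toLex x.1) false).map (fun x => x.2)
      = PySem.List.sorted (e.map (fun q => q.2)) (fun p => p.1) false := by
  rw [PySem.List.sorted_eq_foldl_insertBy, PySem.List.sorted_eq_foldl_insertBy,
    List.foldl_map]
  have h0 := pvFold_sim e [] he (by simp) (by simp) h10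
  simp only [List.map_nil] at h0
  rw [h0, List.map_map]
  have hc : ((fun (x : (((Int ×ₗ String) × Int) × (String × String))) => x.2) ∘ pvDec)
      = (fun (x : Int × (String × String)) => x.2) := rfl
  rw [hc, pvFold_snd]
  simp

-- projecting the filtered enumeration gives the filtered list
lemma pvEnum_filter_snd {α : Type} (p : α → Bool) :
    ∀ (l : List α) (s : Int),
      ((PySem.List.enumerate l s).filter (fun q => p q.2)).map (fun q => q.2) = l.filter p := by
  intro l
  induction l with
  | nil => intro s; simp [PySem.List.enumerate]
  | cons x xs ih =>
    intro s
    rw [PySem.List.enumerate_cons]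
    by_cases hx : p x
    · simp [hx, ih]
    · simp [hx, ih]

-- ===== VERDICT (by name: the statement is the Claim_ definition above) =====
theorem order_pairs_py_spec : Claim_equal_order_pairs_py := by
  intro pairs _
  unfold Spec_order_pairs_py
  rw [A_char, B_char]
  set E := PySem.List.enumerate pairs 0 with hE
  set D := E.map pvDec with hD
  -- shape and index facts about the decorated list
  have hidx : D.Pairwise (fun x y => x.1.2 < y.1.2) :=
    List.Pairwise.map pvDec (fun a b h => h) (PySem.List.pairwise_lt_enumerate pairs 0)
  have hshape : ∀ x ∈ D, toLex x.1 = toLex (toLex (pvRF x.2.1,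
      if pvRF x.2.1 == (pvCanon.length : Int) then x.2.1 else ""), x.1.2) := by
    intro x hx
    rcases List.mem_map.1 hx with ⟨q, _, rfl⟩
    rfl
  have hlen : (pvCanon.length : Int) = 10 := rfl
  -- the canonical blocks and the sorted unknown tail, in the decorated world
  set S := PySem.List.sorted (D.filter (fun x => decide (x.2.1 ∉ pvCanon)))
    (fun x => toLex x.1) false with hS
  have hsorted : PySem.List.sorted D (fun x => toLex x.1) false
      = pvCanon.flatMap (fun k => D.filter (fun x => x.2.1 == k)) ++ S := by
    apply PySem.List.sorted_eq_of_perm_of_pairwise_lt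
    · exact List.Perm.trans
        (List.Perm.append_left _ (PySem.List.sorted_perm _ _ _))
        (pvPerm_blocks (fun x => x.2.1) pvCanon (by decide) D)
    · apply pvPw_flatMap_append
      · -- within one canonical block: equal (rank, str), strictly increasing index
        intro k _
        apply List.Pairwise.imp_of_mem ?_ (List.Pairwise.filter _ hidx)
        intro a b ha hb hab
        have hak : a.2.1 = k := by simpa using (List.mem_filter.1 ha).2
        have hbk : b.2.1 = k := by simpa using (List.mem_filter.1 hb).2
        rw [hshape a (List.mem_of_mem_filter ha), hshape b (List.mem_of_mem_filter hb),
          hak, hbk, pvLt_key]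
        exact Or.inr ⟨rfl, Or.inr ⟨rfl, hab⟩⟩
      · -- across two canonical blocks: strictly increasing rank
        apply List.Pairwise.imp_of_mem ?_ pvRF_pairwise
        intro a b _ _ hab x hx y hy
        have hxa : x.2.1 = a := by simpa using (List.mem_filter.1 hx).2
        have hyb : y.2.1 = b := by simpa using (List.mem_filter.1 hy).2
        rw [hshape x (List.mem_of_mem_filter hx), hshape y (List.mem_of_mem_filter hy),
          hxa, hyb, pvLt_key]
        exact Or.inl hab
      · -- canonical block before unknown tail: rank < 10
        intro k hk x hx y hy
        have hy' : y ∈ D.filter (fun x => decide (x.2.1 ∉ pvCanon)) :=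
          (PySem.List.mem_sorted _ _ _ _).1 hy
        have hyn : y.2.1 ∉ pvCanon := by simpa using (List.mem_filter.1 hy').2
        have hxa : x.2.1 = k := by simpa using (List.mem_filter.1 hx).2
        rw [hshape x (List.mem_of_mem_filter hx),
          hshape y (List.mem_of_mem_filter hy'), pvLt_key]
        exact Or.inl (by rw [hxa, pvRF_not_mem hyn]; exact pvRF_lt_ten k hk)
      · -- within the sorted unknown tail: keys weakly increase and are distinct
        have hle : S.Pairwise (fun a b => toLex a.1 ≤ toLex b.1) :=
          PySem.List.sorted_pairwise _ _
        have hne : S.Pairwise (fun a b => a.1.2 ≠ b.1.2) := by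
          refine (List.Perm.pairwise_iff (fun h => Ne.symm h)
            (PySem.List.sorted_perm _ _ _)).2 ?_
          exact List.Pairwise.imp (fun h => ne_of_lt h) (List.Pairwise.filter _ hidx)
        apply List.Pairwise.imp ?_ (hle.and hne)
        rintro a b ⟨h1, h2⟩
        exact lt_of_le_of_ne h1 (fun h => h2 (congrArg (fun z => z.2) (toLex_inj.1 h)))
  rw [hsorted, List.map_append, List.map_flatMap]
  congr 1
  · -- each canonical block projects to the filtered pairs
    rw [List.flatMap_def, List.flatMap_def]
    congr 1
    apply List.map_congr_left
    intro k _
    rw [hD, List.filter_map, List.map_map]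
    have hc : ((fun (x : (((Int ×ₗ String) × Int) × (String × String))) => x.2) ∘ pvDec)
        = (fun (q : Int × (String × String)) => q.2) := rfl
    rw [hc]
    exact pvEnum_filter_snd (fun p => p.1 == k) pairs 0
  · -- the unknown tail projects to the sorted unknown pairs
    rw [hS, hD, List.filter_map]
    have hfe : ((fun (x : (((Int ×ₗ String) × Int) × (String × String))) =>
        decide (x.2.1 ∉ pvCanon)) ∘ pvDec)
        = (fun (q : Int × (String × String)) => decide (q.2.1 ∉ pvCanon)) := rfl
    rw [hfe]
    set e := E.filter (fun q => decide (q.2.1 ∉ pvCanon)) with he'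
    have hpw : e.Pairwise (fun p q => p.1 < q.1) :=
      List.Pairwise.filter _ (PySem.List.pairwise_lt_enumerate pairs 0)
    have hmem : ∀ q ∈ e, q.2.1 ∉ pvCanon := by
      intro q hq
      simpa using (List.mem_filter.1 hq).2
    rw [pvStab e hpw hmem]
    congr 1
    exact pvEnum_filter_snd (fun p => decide (p.1 ∉ pvCanon)) pairs 0
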